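-- pv_equiv track=rewrite | github.com/ritusoni2298/Codes | python/Goals.py | goals
-- ===== SOURCE A (Python) =====
-- from itertools import combinations_with_replacement
-- from functools import reduce
--
-- def goals(n,ls):
--     lst=[]
--     for i in range(1,n):
--         ls1=list(combinations_with_replacement(ls,r=i))
--         for j in ls1:
--             if reduce(lambda x,y:x+y,j)==n:
--                 lst.append(j)
--     return (lst)
-- ===== SOURCE B (Python) =====
-- def goals(n, ls):
--     # fused generate-and-test recursion: threads the partial sum instead of
--     # materialising every combination and re-summing it with reduce
--     def rec(xs, length, s):
--         if length == 0:
--             return [()] if s == n else []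
--         if not xs:
--             return []
--         x = xs[0]
--         return [(x,) + t for t in rec(xs, length - 1, s + x)] + rec(xs[1:], length, s)
--     return [t for i in range(1, n) for t in rec(ls, i, 0)]
-- ===== Notes on version B (the rewrite author's own statement) =====
-- stated objective: alternative
-- what changed: Replaces the itertools combinations_with_replacement + reduce-per-tuple generate-then-filter with a single fused recursion over the list's suffixes that threads the partial sum and emits only the tuples summing to n.
import Mathlib
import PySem

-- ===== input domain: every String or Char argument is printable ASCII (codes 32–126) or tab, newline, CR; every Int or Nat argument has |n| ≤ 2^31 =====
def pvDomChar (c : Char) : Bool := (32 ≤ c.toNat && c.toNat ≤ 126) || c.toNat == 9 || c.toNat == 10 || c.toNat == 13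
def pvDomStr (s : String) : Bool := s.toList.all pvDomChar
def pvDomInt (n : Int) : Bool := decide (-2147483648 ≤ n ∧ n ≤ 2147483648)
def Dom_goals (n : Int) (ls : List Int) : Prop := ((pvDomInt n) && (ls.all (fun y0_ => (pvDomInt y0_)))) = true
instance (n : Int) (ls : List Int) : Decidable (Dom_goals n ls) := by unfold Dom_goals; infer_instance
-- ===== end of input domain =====

-- B replaces the generate-then-filter over itertools.combinations_with_replacement by a fused
-- recursion over the list's suffixes that threads the partial sum (alternative decomposition).

-- ===== PORT A =====
-- hand port of list(itertools.combinations_with_replacement(xs, r)) (CPython's index-lexicographic order; exact)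
def cwr : List Int → Nat → List (List Int)
  | _, 0 => [[]]
  | [], _+1 => []
  | x :: t, r+1 => ((cwr (x :: t) r).map (fun c => x :: c)) ++ cwr t (r+1)
termination_by xs r => (r, xs.length)

-- reduce(lambda x,y:x+y, j); reduce raises on an empty tuple, but A only applies it to tuples of
-- length i ≥ 1, so the [] branch is unreachable there
def redsum : List Int → Int
  | [] => 0
  | h :: t => t.foldl (· + ·) h

def goals (n : Int) (ls : List Int) : List (List Int) :=
  (PySem.List.pyRange 1 n 1).foldl
    (fun lst i =>
      (cwr ls i.toNat).foldl (fun lst j => if redsum j = n then lst ++ [j] else lst) lst)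
    []

-- ===== PORT B =====
def recAlt (n : Int) : List Int → Nat → Int → List (List Int)
  | _, 0, s => if s = n then [[]] else []
  | [], _+1, _ => []
  | x :: t, r+1, s => ((recAlt n (x :: t) r (s + x)).map (fun u => x :: u)) ++ recAlt n t (r+1) s
termination_by xs r _ => (r, xs.length)

def goals_alt (n : Int) (ls : List Int) : List (List Int) :=
  (PySem.List.pyRange 1 n 1).flatMap (fun i => recAlt n ls i.toNat 0)

-- ===== PRECONDITION & SPEC =====
def Spec_goals (n : Int) (ls : List Int) (out : List (List Int)) : Prop := out = goals_alt n ls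
instance (n : Int) (ls : List Int) (out : List (List Int)) : Decidable (Spec_goals n ls out) := by unfold Spec_goals; infer_instance

-- ===== CLAIM (what is proved, stated in full; the proofs are below) =====
def Claim_equal_goals : Prop := ∀ (n : Int) (ls : List Int), Dom_goals n ls → Spec_goals n ls (goals n ls)

-- ===== LEMMAS AND PROOFS =====

lemma foldl_add_eq (t : List Int) (a : Int) : t.foldl (· + ·) a = a + t.sum := by
  induction t generalizing a with
  | nil => simp
  | cons x t ih => simp [List.foldl, ih]; ring

lemma redsum_eq_sum (j : List Int) : redsum j = j.sum := by
  cases j with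
  | nil => simp [redsum]
  | cons h t => simp [redsum, foldl_add_eq]

lemma recAlt_eq (n : Int) :
    ∀ (r : Nat) (xs : List Int) (s : Int),
      recAlt n xs r s = (cwr xs r).filter (fun j => decide (s + j.sum = n)) := by
  intro r
  induction r with
  | zero =>
    intro xs s
    simp [recAlt, cwr]
    split_ifs with h <;> simp [h] at * <;> omega
  | succ r ih =>
    intro xs
    induction xs with
    | nil => intro s; simp [recAlt, cwr]
    | cons x t iht =>
      intro s
      simp only [recAlt, cwr, ih, iht, List.filter_append, List.filter_map]
      congr 1
      congr 1
      apply List.filter_congr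
      intro j _
      simp [Function.comp, add_assoc]

-- ===== VERDICT (by name: the statement is the Claim_ definition above) =====

theorem goals_spec : Claim_equal_goals := by
  intro n ls _
  unfold Spec_goals goals goals_alt
  have hinner :
      (fun (lst : List (List Int)) (i : Int) =>
        (cwr ls i.toNat).foldl (fun lst j => if redsum j = n then lst ++ [j] else lst) lst)
      = fun lst i => lst ++ recAlt n ls i.toNat 0 := by
    funext lst i
    rw [PySem.List.foldl_append_ite_eq_filter, recAlt_eq]
    congr 1
    apply List.filter_congr
    intro j _
    simp [redsum_eq_sum]
  rw [hinner, PySem.List.foldl_append_eq_flatMap]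
  simp
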